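-- pv_equiv track=rewrite | github.com/camigomezdev/dojo_datastructures | ejercicio.py | obtener_ciudad_mayor_variedad_carreras
-- ===== SOURCE A (Python) =====
-- def obtener_ciudad_mayor_variedad_carreras(estudiantes):
--     ciudades = {}
--
--     for estudiante in estudiantes:
--         ciudad = estudiante['ciudad']
--         carrera = estudiante['carrera']
--
--         if ciudad in ciudades:
--             ciudades[ciudad].add(carrera)
--         else:
--             ciudades[ciudad] = {carrera}
--
--     ciudad_max_variedad_carreras = max(ciudades, key=lambda x: len(ciudades[x]))
--     return ciudad_max_variedad_carreras
-- ===== SOURCE B (Python) =====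
-- def obtener_ciudad_mayor_variedad_carreras(estudiantes):
--     # pass 1: cities in order of first appearance
--     ciudades = []
--     for estudiante in estudiantes:
--         ciudad = estudiante['ciudad']
--         if ciudad not in ciudades:
--             ciudades.append(ciudad)
--     # pass 2: for each city, rescan all students and count its distinct careers,
--     # keeping the first city with the strictly largest count
--     mejor = None
--     mejor_variedad = 0
--     for ciudad in ciudades:
--         carreras = []
--         for estudiante in estudiantes:
--             if estudiante['ciudad'] == ciudad:
--                 carrera = estudiante['carrera']
--                 if carrera not in carreras:
--                     carreras.append(carrera)
--         if len(carreras) > mejor_variedad: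
--             mejor = ciudad
--             mejor_variedad = len(carreras)
--     return mejor
-- ===== Notes on version B (the rewrite author's own statement) =====
-- stated objective: alternative
-- what changed: A builds a dict of per-city career sets in one pass and takes max over its keys; B is two staged passes with no dict and no sets: first collect the cities in first-appearance order into a list, then for each city rescan the whole student list counting its distinct careers and keep the running strictly-best city.
import Mathlib
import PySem

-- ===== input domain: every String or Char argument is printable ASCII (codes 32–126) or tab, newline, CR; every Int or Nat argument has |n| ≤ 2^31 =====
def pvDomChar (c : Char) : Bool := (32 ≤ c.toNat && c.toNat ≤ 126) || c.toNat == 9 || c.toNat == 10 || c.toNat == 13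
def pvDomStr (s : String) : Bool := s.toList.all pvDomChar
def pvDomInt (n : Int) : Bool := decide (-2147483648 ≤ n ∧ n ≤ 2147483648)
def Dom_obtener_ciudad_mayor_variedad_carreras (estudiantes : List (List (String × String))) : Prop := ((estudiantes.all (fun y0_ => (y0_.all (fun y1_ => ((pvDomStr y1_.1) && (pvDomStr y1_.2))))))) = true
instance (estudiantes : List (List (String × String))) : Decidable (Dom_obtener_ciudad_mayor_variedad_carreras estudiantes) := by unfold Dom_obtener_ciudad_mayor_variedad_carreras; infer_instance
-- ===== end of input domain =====

-- B replaces A's one-pass dict of per-city career sets by two staged passes with no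
-- dict: collect cities in first-appearance order, then rescan the students per city
-- counting its distinct careers, keeping the strictly best (objective: alternative).
-- Equivalence of the RETURN value is proved on Pre_ (Python A raises outside it).

-- ===== PORT A =====
-- both ports read a student's two keys this way
def pvCityOf (estudiante : List (String × String)) : String :=
  (PySem.Dict.mk estudiante).getD "ciudad" ""
def pvCarreraOf (estudiante : List (String × String)) : String :=
  (PySem.Dict.mk estudiante).getD "carrera" ""

-- one iteration of A's for-loop: read the two keys, grow the city's career set
def pvStepA (d : PySem.Dict String (PySem.Set String)) (estudiante : List (String × String)) : PySem.Dict String (PySem.Set String) :=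
  let ciudad := pvCityOf estudiante
  let carrera := pvCarreraOf estudiante
  if d.contains ciudad then
    d.modify ciudad [] (fun s => PySem.Set.add s carrera)
  else
    d.insert ciudad (PySem.Set.ofList [carrera])

def obtener_ciudad_mayor_variedad_carreras (estudiantes : List (List (String × String))) : String :=
  let ciudades := estudiantes.foldl pvStepA PySem.Dict.empty
  -- max(ciudades, key=lambda x: len(ciudades[x])); Pre_ rules out the empty dict (ValueError)
  (PySem.List.max? ciudades.keys (fun x => ((ciudades.getD x []).length : Int))).getD ""

-- ===== PORT B =====
-- pass 1 body: 'if ciudad not in ciudades: ciudades.append(ciudad)'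
def pvCiuStep (acc : List String) (estudiante : List (String × String)) : List String :=
  let ciudad := pvCityOf estudiante
  if ciudad ∈ acc then acc else acc ++ [ciudad]

def pvCiudadesB (estudiantes : List (List (String × String))) : List String :=
  estudiantes.foldl pvCiuStep []

-- inner loop of pass 2: collect the distinct careers of one city
def pvCarStep (ciudad : String) (acc : List String) (estudiante : List (String × String)) : List String :=
  if pvCityOf estudiante = ciudad then
    let carrera := pvCarreraOf estudiante
    if carrera ∈ acc then acc else acc ++ [carrera]
  else acc

def pvCarrerasB (estudiantes : List (List (String × String))) (ciudad : String) : List String :=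
  estudiantes.foldl (pvCarStep ciudad) []

def obtener_ciudad_mayor_variedad_carreras_alt (estudiantes : List (List (String × String))) : String :=
  let ciudades := pvCiudadesB estudiantes
  -- (mejor, mejor_variedad), updated when a strictly larger count appears
  let st := ciudades.foldl
    (fun (st : Option String × Int) ciudad =>
      let n : Int := (pvCarrerasB estudiantes ciudad).length
      if st.2 < n then (some ciudad, n) else st)
    (none, 0)
  st.1.getD ""

-- ===== PRECONDITION & SPEC =====
-- Pre_: exactly where Python A returns — a nonempty list (else max raises ValueError)
-- of students each carrying both keys (else KeyError)
def Pre_obtener_ciudad_mayor_variedad_carreras (estudiantes : List (List (String × String))) : Prop :=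
  estudiantes ≠ [] ∧ ∀ est ∈ estudiantes, "ciudad" ∈ est.map Prod.fst ∧ "carrera" ∈ est.map Prod.fst
instance (estudiantes : List (List (String × String))) : Decidable (Pre_obtener_ciudad_mayor_variedad_carreras estudiantes) := by unfold Pre_obtener_ciudad_mayor_variedad_carreras; infer_instance

def pvWitness_obtener_ciudad_mayor_variedad_carreras : (List (List (String × String))) :=
  ([[("ciudad", "Cali"), ("carrera", "Arte")], [("ciudad", "Cali"), ("carrera", "Leyes")]])

def Spec_obtener_ciudad_mayor_variedad_carreras (estudiantes : List (List (String × String))) (out : String) : Prop := out = obtener_ciudad_mayor_variedad_carreras_alt estudiantes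
instance (estudiantes : List (List (String × String))) (out : String) : Decidable (Spec_obtener_ciudad_mayor_variedad_carreras estudiantes out) := by unfold Spec_obtener_ciudad_mayor_variedad_carreras; infer_instance

-- ===== CLAIM (what is proved, stated in full; the proofs are below) =====
def Claim_equal_obtener_ciudad_mayor_variedad_carreras : Prop := ∀ (estudiantes : List (List (String × String))), Dom_obtener_ciudad_mayor_variedad_carreras estudiantes → Pre_obtener_ciudad_mayor_variedad_carreras estudiantes → Spec_obtener_ciudad_mayor_variedad_carreras estudiantes (obtener_ciudad_mayor_variedad_carreras estudiantes)

-- ===== LEMMAS AND PROOFS =====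

-- Set.add on strings is the 'if not in: append' step
lemma pv_set_add_eq (s : List String) (x : String) :
    PySem.Set.add s x = if x ∈ s then s else s ++ [x] := by
  by_cases h : x ∈ s <;> simp [PySem.Set.add, PySem.Set.contains, h]

-- A's loop step changes only the entry of the student's city, by Set.add
lemma pv_getD_stepA (d : PySem.Dict String (PySem.Set String)) (e : List (String × String)) (c : String) :
    (pvStepA d e).getD c [] =
      if c = pvCityOf e then PySem.Set.add (d.getD (pvCityOf e) []) (pvCarreraOf e)
      else d.getD c [] := by
  simp only [pvStepA]
  by_cases hdc : d.contains (pvCityOf e) = true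
  · rw [if_pos hdc, PySem.Dict.getD_modify]
  · rw [if_neg hdc, PySem.Dict.getD_insert]
    by_cases hc : c = pvCityOf e
    · subst hc
      rw [if_pos rfl, if_pos rfl,
        PySem.Dict.getD_of_not_contains d [] (by simpa using hdc)]
      rfl
    · rw [if_neg hc, if_neg hc]

-- A's entry for city c, along any prefix, is B's inner career loop seeded at that entry
lemma pv_getD_foldA (l : List (List (String × String))) (d : PySem.Dict String (PySem.Set String)) (c : String) :
    (l.foldl pvStepA d).getD c [] = l.foldl (pvCarStep c) (d.getD c []) := by
  induction l generalizing d with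
  | nil => rfl
  | cons e t ih =>
    simp only [List.foldl_cons]
    rw [ih]
    congr 1
    rw [pv_getD_stepA]
    simp only [pvCarStep]
    by_cases hc : pvCityOf e = c
    · rw [if_pos (hc.symm), if_pos hc, hc, pv_set_add_eq]
    · rw [if_neg (fun h => hc h.symm), if_neg hc]

-- A's key list, along any prefix, is B's first pass over the same prefix
lemma pv_keys_foldA (l : List (List (String × String))) (d : PySem.Dict String (PySem.Set String)) (acc : List String) (h : d.keys = acc) :
    (l.foldl pvStepA d).keys = l.foldl pvCiuStep acc := by
  induction l generalizing d acc with
  | nil => exact h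
  | cons e t ih =>
    simp only [List.foldl_cons]
    apply ih
    simp only [pvStepA, pvCiuStep]
    by_cases hdc : (PySem.Dict.contains d (pvCityOf e)) = true
    · have hm : pvCityOf e ∈ acc := by
        rw [← h, ← PySem.Dict.contains_iff_mem_keys]; exact hdc
      rw [if_pos hdc, if_pos hm, PySem.Dict.keys_modify,
        PySem.Dict.keys_insert_of_contains d _ hdc, h]
    · have hm : pvCityOf e ∉ acc := by
        rw [← h, ← PySem.Dict.contains_iff_mem_keys]; simpa using hdc
      rw [if_neg hdc, if_neg hm,
        PySem.Dict.keys_insert_of_not_contains d _ (by simpa using hdc), h]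

-- every city of pass 1 comes from some student
lemma pv_mem_ciu (l : List (List (String × String))) (acc : List String) (c : String)
    (h : c ∈ l.foldl pvCiuStep acc) : c ∈ acc ∨ ∃ e ∈ l, pvCityOf e = c := by
  induction l generalizing acc with
  | nil => exact Or.inl h
  | cons e t ih =>
    simp only [List.foldl_cons] at h
    rcases ih _ h with hacc | ⟨e', he', hc⟩
    · simp only [pvCiuStep] at hacc
      by_cases hm : pvCityOf e ∈ acc
      · rw [if_pos hm] at hacc; exact Or.inl hacc
      · rw [if_neg hm] at hacc
        rcases List.mem_append.mp hacc with h1 | h2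
        · exact Or.inl h1
        · exact Or.inr ⟨e, List.mem_cons_self, (List.mem_singleton.mp h2).symm⟩
    · exact Or.inr ⟨e', List.mem_cons_of_mem _ he', hc⟩

-- the inner loop never empties a nonempty accumulator
lemma pv_car_ne_of_acc (l : List (List (String × String))) (c : String) (acc : List String)
    (h : acc ≠ []) : l.foldl (pvCarStep c) acc ≠ [] := by
  induction l generalizing acc with
  | nil => exact h
  | cons e t ih =>
    apply ih
    simp only [pvCarStep]
    split_ifs <;> simp [h]

-- a city with a student yields a nonempty career list
lemma pv_car_ne (l : List (List (String × String))) (c : String)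
    (h : ∃ e ∈ l, pvCityOf e = c) : l.foldl (pvCarStep c) [] ≠ [] := by
  induction l with
  | nil => rcases h with ⟨e, he, -⟩; exact absurd he (List.not_mem_nil)
  | cons e t ih =>
    simp only [List.foldl_cons]
    rcases h with ⟨e', he', hc⟩
    rcases List.mem_cons.mp he' with rfl | ht
    · apply pv_car_ne_of_acc
      simp [pvCarStep, hc]
    · by_cases hz : pvCarStep c [] e = []
      · rw [hz]; exact ih ⟨e', ht, hc⟩
      · exact pv_car_ne_of_acc t c _ hz

-- shuffling max?'s head: one comparison step folded into the list
lemma pv_max?_cons_cons (k : String → Int) (m x : String) (t : List String) :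
    PySem.List.max? (m :: x :: t) k = PySem.List.max? ((if k m < k x then x else m) :: t) k := by
  by_cases h : k m < k x <;> simp [PySem.List.max?, h]

-- max? of a nonempty list is the running strict-best loop seeded with the head
lemma pv_maxfold_some (k : String → Int) (l : List String) (m : String) :
    PySem.List.max? (m :: l) k
    = (l.foldl (fun (st : Option String × Int) x => if st.2 < k x then (some x, k x) else st) (some m, k m)).1 := by
  induction l generalizing m with
  | nil => simp [PySem.List.max?]
  | cons x t ih =>
    rw [pv_max?_cons_cons, List.foldl_cons]
    by_cases h : k m < k x
    · rw [if_pos h, if_pos h]; exact ih x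
    · rw [if_neg h, if_neg h]; exact ih m

-- the same from the empty seed, when every key is positive
lemma pv_maxfold_none (k : String → Int) (l : List String) (h : ∀ c ∈ l, 0 < k c) :
    PySem.List.max? l k
    = (l.foldl (fun (st : Option String × Int) x => if st.2 < k x then (some x, k x) else st) (none, 0)).1 := by
  cases l with
  | nil => simp [PySem.List.max?]
  | cons x t =>
    rw [List.foldl_cons]
    have hx : ((none, 0) : Option String × Int).2 < k x := h x List.mem_cons_self
    rw [if_pos hx]
    exact pv_maxfold_some k t x

-- ===== VERDICT (by name: the statement is the Claim_ definition above) =====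
theorem obtener_ciudad_mayor_variedad_carreras_spec : Claim_equal_obtener_ciudad_mayor_variedad_carreras := by
  intro estudiantes _ _
  unfold Spec_obtener_ciudad_mayor_variedad_carreras
  unfold obtener_ciudad_mayor_variedad_carreras obtener_ciudad_mayor_variedad_carreras_alt
  dsimp only
  have hkeys : (estudiantes.foldl pvStepA PySem.Dict.empty).keys = pvCiudadesB estudiantes :=
    pv_keys_foldA estudiantes PySem.Dict.empty [] rfl
  have hgetD : ∀ c, (estudiantes.foldl pvStepA PySem.Dict.empty).getD c [] = pvCarrerasB estudiantes c := by
    intro c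
    have := pv_getD_foldA estudiantes PySem.Dict.empty c
    rwa [PySem.Dict.getD_empty] at this
  rw [hkeys]
  simp only [hgetD]
  apply congrArg (fun o : Option String => o.getD "")
  have hpos : ∀ c ∈ pvCiudadesB estudiantes, 0 < ((pvCarrerasB estudiantes c).length : Int) := by
    intro c hc
    rcases pv_mem_ciu estudiantes [] c hc with h | h
    · exact absurd h (List.not_mem_nil)
    · have hne := pv_car_ne estudiantes c h
      simp only [pvCarrerasB]
      have hlen : 0 < (estudiantes.foldl (pvCarStep c) []).length := List.length_pos_iff.mpr hne
      exact_mod_cast hlen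
  exact pv_maxfold_none _ _ hpos
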